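-- pv_equiv track=rewrite | github.com/Nghia03092004/nghia03092004.github.io | project_euler_unified/problem_156/solution.py | solve
-- ===== SOURCE A (Python) =====
-- def f(n, d):
--     """Count occurrences of digit d in all numbers from 1 to n."""
--     if n <= 0:
--         return 0
--     count = 0
--     power = 1
--     while power <= n:
--         high = n // (power * 10)
--         cur = (n // power) % 10
--         low = n % power
--         if cur < d:
--             count += high * power
--         elif cur == d:
--             count += high * power + low + 1
--         else:
--             count += (high + 1) * power
--         power *= 10
--     return count
--
-- def solve(lo, hi, d):
--     """Find sum of all n in [lo, hi] where f(n, d) = n."""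
--     if lo > hi:
--         return 0
--
--     glo = f(lo, d) - lo
--     ghi = f(hi, d) - hi
--
--     # Bounds on g(n) = f(n,d) - n in [lo, hi]:
--     # g(n) >= f(lo,d) - hi = glo - (hi - lo)  [since f non-decreasing]
--     # g(n) <= f(hi,d) - lo = ghi + (hi - lo)
--     g_lower = glo - (hi - lo)
--     g_upper = ghi + (hi - lo)
--
--     if g_lower > 0 or g_upper < 0:
--         return 0
--
--     if lo == hi:
--         return lo if glo == 0 else 0
--
--     mid = lo + (hi - lo) // 2
--     return solve(lo, mid, d) + solve(mid + 1, hi, d)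
-- ===== SOURCE B (Python) =====
-- def f(n, d):
--     """Count occurrences of digit d in all numbers from 1 to n."""
--     if n <= 0:
--         return 0
--     count = 0
--     power = 1
--     while power <= n:
--         high = n // (power * 10)
--         cur = (n // power) % 10
--         low = n % power
--         if cur < d:
--             count += high * power
--         elif cur == d:
--             count += high * power + low + 1
--         else:
--             count += (high + 1) * power
--         power *= 10
--     return count
--
-- def solve(lo, hi, d):
--     """Find sum of all n in [lo, hi] where f(n, d) = n (iterative, explicit stack)."""
--     total = 0
--     stack = [(lo, hi)]
--     while stack:
--         a, b = stack.pop()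
--         if a > b:
--             continue
--         glo = f(a, d) - a
--         ghi = f(b, d) - b
--         if glo - (b - a) > 0 or ghi + (b - a) < 0:
--             continue
--         if a == b:
--             if glo == 0:
--                 total += a
--             continue
--         mid = a + (b - a) // 2
--         stack.append((mid + 1, b))
--         stack.append((a, mid))
--     return total
-- ===== Notes on version B (the rewrite author's own statement) =====
-- stated objective: alternative
-- what changed: solve's recursive interval bisection is replaced by an iterative worklist loop with an explicit stack of intervals and a running total; f is unchanged.
import Mathlib
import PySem

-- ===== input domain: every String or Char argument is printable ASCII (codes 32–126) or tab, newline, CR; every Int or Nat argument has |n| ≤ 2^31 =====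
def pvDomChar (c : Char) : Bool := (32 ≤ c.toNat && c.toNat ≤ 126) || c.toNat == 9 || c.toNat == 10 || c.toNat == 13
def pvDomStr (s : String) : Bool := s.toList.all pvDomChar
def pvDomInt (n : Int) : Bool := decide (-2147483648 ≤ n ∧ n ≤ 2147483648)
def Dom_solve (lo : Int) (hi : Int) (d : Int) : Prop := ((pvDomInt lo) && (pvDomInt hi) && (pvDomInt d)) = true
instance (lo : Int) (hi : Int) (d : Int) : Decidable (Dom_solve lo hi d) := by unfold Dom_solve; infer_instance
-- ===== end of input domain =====

-- B replaces A's recursive interval bisection in solve by an iterative worklist loop with an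
-- explicit stack (alternative decomposition; f is unchanged). Same return value everywhere.

-- termination lemmas cited by the ports' decreasing_by (proofs kept out of the definitions)
theorem pvFLoopDec (n power : Int) (hp : 0 < power) (h : power ≤ n) :
    (n + 1 - power * 10).toNat < (n + 1 - power).toNat := by
  have h1 : power < power * 10 := lt_mul_of_one_lt_right hp (by norm_num)
  have h3 : (0:Int) < n + 1 - power := by linarith
  exact (Int.toNat_lt_toNat h3).mpr (by linarith)

theorem pvPowPos (power : Int) (hp : 0 < power) : 0 < power * 10 := by omega

theorem pvSolveDec1 (lo hi : Int) (h1 : ¬ lo > hi) (h2 : ¬ lo = hi) :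
    (lo + PySem.Int.floordiv (hi - lo) 2 - lo).toNat < (hi - lo).toNat := by
  have hlt : lo < hi := lt_of_le_of_ne (not_lt.mp h1) h2
  have h0 : (0:Int) < hi - lo := by linarith
  have hq : PySem.Int.floordiv (hi - lo) 2 = (hi - lo) / 2 :=
    PySem.Int.floordiv_eq_ediv_of_pos (by norm_num)
  have hq1 : (hi - lo) / 2 < hi - lo := (Int.ediv_lt_iff_lt_mul (by norm_num)).mpr (by linarith)
  rw [hq, add_sub_cancel_left]
  exact (Int.toNat_lt_toNat h0).mpr hq1

theorem pvSolveDec2 (lo hi : Int) (h1 : ¬ lo > hi) (h2 : ¬ lo = hi) :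
    (hi - (lo + PySem.Int.floordiv (hi - lo) 2 + 1)).toNat < (hi - lo).toNat := by
  have hlt : lo < hi := lt_of_le_of_ne (not_lt.mp h1) h2
  have h0 : (0:Int) < hi - lo := by linarith
  have hq : PySem.Int.floordiv (hi - lo) 2 = (hi - lo) / 2 :=
    PySem.Int.floordiv_eq_ediv_of_pos (by norm_num)
  have hq0 : 0 ≤ (hi - lo) / 2 := Int.ediv_nonneg (by linarith) (by norm_num)
  rw [hq]
  exact (Int.toNat_lt_toNat h0).mpr (by linarith)

-- ===== PORT A =====
-- while power <= n: … ; the hypothesis 0 < power is the loop invariant needed for termination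
def fLoop (n d power count : Int) (hp : 0 < power) : Int :=
  if power ≤ n then
    let high := PySem.Int.floordiv n (power * 10)
    let cur := PySem.Int.mod (PySem.Int.floordiv n power) 10
    let low := PySem.Int.mod n power
    let count' :=
      if cur < d then count + high * power
      else if cur = d then count + high * power + low + 1
      else count + (high + 1) * power
    fLoop n d (power * 10) count' (pvPowPos power hp)
  else count
termination_by (n + 1 - power).toNat
decreasing_by exact pvFLoopDec n power hp ‹_›

def f (n : Int) (d : Int) : Int :=
  if n ≤ 0 then 0 else fLoop n d 1 0 Int.one_pos

def solve (lo : Int) (hi : Int) (d : Int) : Int :=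
  if lo > hi then 0
  else
    let glo := f lo d - lo
    let ghi := f hi d - hi
    let g_lower := glo - (hi - lo)
    let g_upper := ghi + (hi - lo)
    if g_lower > 0 ∨ g_upper < 0 then 0
    else if lo = hi then (if glo = 0 then lo else 0)
    else
      let mid := lo + PySem.Int.floordiv (hi - lo) 2
      solve lo mid d + solve (mid + 1) hi d
termination_by (hi - lo).toNat
decreasing_by
  · exact pvSolveDec1 lo hi ‹_› ‹_›
  · exact pvSolveDec2 lo hi ‹_› ‹_›

-- ===== PORT B =====
-- B keeps f unchanged (same while-loop, transcribed again for B's port)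
def fLoopAlt (n d power count : Int) (hp : 0 < power) : Int :=
  if power ≤ n then
    let high := PySem.Int.floordiv n (power * 10)
    let cur := PySem.Int.mod (PySem.Int.floordiv n power) 10
    let low := PySem.Int.mod n power
    let count' :=
      if cur < d then count + high * power
      else if cur = d then count + high * power + low + 1
      else count + (high + 1) * power
    fLoopAlt n d (power * 10) count' (pvPowPos power hp)
  else count
termination_by (n + 1 - power).toNat
decreasing_by exact pvFLoopDec n power hp ‹_›

def fAlt (n : Int) (d : Int) : Int :=
  if n ≤ 0 then 0 else fLoopAlt n d 1 0 Int.one_pos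

-- weight of one stack entry, used only for termination of the worklist loop
def pvWeight (p : Int × Int) : Nat := (2 * (p.2 - p.1) + 1).toNat

-- lex-measure lemmas cited by solveLoop's decreasing_by
theorem pvLexPop (a b : Int) (rest : List (Int × Int)) (h : a > b) :
    Prod.Lex (fun x y : Nat => x < y) (fun x y : Nat => x < y)
      ((List.map pvWeight rest).sum, rest.length)
      ((List.map pvWeight ((a, b) :: rest)).sum, ((a, b) :: rest).length) := by
  have hw : pvWeight (a, b) = 0 := by
    simp only [pvWeight]
    exact Int.toNat_eq_zero.mpr (by linarith)
  simp only [List.map_cons, List.sum_cons, hw, Nat.zero_add, List.length_cons]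
  exact Prod.Lex.right _ (Nat.lt_succ_self _)

theorem pvLexDrop (a b : Int) (rest : List (Int × Int)) (h : ¬ a > b) :
    Prod.Lex (fun x y : Nat => x < y) (fun x y : Nat => x < y)
      ((List.map pvWeight rest).sum, rest.length)
      ((List.map pvWeight ((a, b) :: rest)).sum, ((a, b) :: rest).length) := by
  apply Prod.Lex.left
  have hw : 0 < pvWeight (a, b) := by
    simp only [pvWeight]
    have hx : (0:Int) < 2 * (b - a) + 1 := by linarith
    exact (Int.toNat_lt_toNat hx).mpr hx
  simp only [List.map_cons, List.sum_cons, List.length_cons]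
  exact Nat.lt_add_of_pos_left hw

theorem pvLexSplit (a b : Int) (rest : List (Int × Int)) (h1 : ¬ a > b) (h2 : ¬ a = b) :
    Prod.Lex (fun x y : Nat => x < y) (fun x y : Nat => x < y)
      ((List.map pvWeight
          ((a, a + PySem.Int.floordiv (b - a) 2) :: (a + PySem.Int.floordiv (b - a) 2 + 1, b) :: rest)).sum,
        ((a, a + PySem.Int.floordiv (b - a) 2) :: (a + PySem.Int.floordiv (b - a) 2 + 1, b) :: rest).length)
      ((List.map pvWeight ((a, b) :: rest)).sum, ((a, b) :: rest).length) := by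
  have hab : a < b := lt_of_le_of_ne (not_lt.mp h1) h2
  have h0 : (0:Int) < b - a := by linarith
  have hq : PySem.Int.floordiv (b - a) 2 = (b - a) / 2 :=
    PySem.Int.floordiv_eq_ediv_of_pos (by norm_num)
  have hq0 : 0 ≤ (b - a) / 2 := Int.ediv_nonneg (by linarith) (by norm_num)
  have hq1 : (b - a) / 2 < b - a := (Int.ediv_lt_iff_lt_mul (by norm_num)).mpr (by linarith)
  apply Prod.Lex.left
  simp only [List.map_cons, List.sum_cons]
  generalize (List.map pvWeight rest).sum = S
  simp only [pvWeight, hq, add_sub_cancel_left]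
  rw [← Nat.add_assoc]
  apply Nat.add_lt_add_right
  rw [← Int.toNat_add (by linarith) (by linarith)]
  exact (Int.toNat_lt_toNat (by linarith)).mpr (by linarith)

-- the while-stack loop of B's solve; pops (a,b), prunes, or pushes the two halves
def solveLoop (d : Int) (stack : List (Int × Int)) (total : Int) : Int :=
  match stack with
  | [] => total
  | (a, b) :: rest =>
    if a > b then solveLoop d rest total
    else
      let glo := fAlt a d - a
      let ghi := fAlt b d - b
      if glo - (b - a) > 0 ∨ ghi + (b - a) < 0 then solveLoop d rest total
      else if a = b then solveLoop d rest (total + (if glo = 0 then a else 0))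
      else
        let mid := a + PySem.Int.floordiv (b - a) 2
        solveLoop d ((a, mid) :: (mid + 1, b) :: rest) total
termination_by ((stack.map pvWeight).sum, stack.length)
decreasing_by
  · exact pvLexPop a b rest ‹_›
  · exact pvLexDrop a b rest ‹_›
  · exact pvLexDrop a b rest ‹_›
  · exact pvLexSplit a b rest ‹_› ‹_›

def solve_alt (lo : Int) (hi : Int) (d : Int) : Int :=
  solveLoop d [(lo, hi)] 0

-- ===== PRECONDITION & SPEC =====
def Spec_solve (lo : Int) (hi : Int) (d : Int) (out : Int) : Prop := out = solve_alt lo hi d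
instance (lo : Int) (hi : Int) (d : Int) (out : Int) : Decidable (Spec_solve lo hi d out) := by unfold Spec_solve; infer_instance

-- ===== CLAIM (what is proved, stated in full; the proofs are below) =====
def Claim_equal_solve : Prop := ∀ (lo : Int) (hi : Int) (d : Int), Dom_solve lo hi d → Spec_solve lo hi d (solve lo hi d)

-- ===== LEMMAS AND PROOFS =====

-- B's copy of f computes the same values as A's f
theorem fLoopAlt_eq (n d power count : Int) (hp : 0 < power) :
    fLoopAlt n d power count hp = fLoop n d power count hp := by
  induction power, count, hp using fLoopAlt.induct n d with
  | case1 power count hp hle high cur low count' ih =>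
      rw [fLoopAlt, fLoop, if_pos hle, if_pos hle]; exact ih
  | case2 power count hp hle => rw [fLoopAlt, fLoop, if_neg hle, if_neg hle]

theorem fAlt_eq (n d : Int) : fAlt n d = f n d := by
  unfold fAlt f
  split_ifs with h
  · rfl
  · exact fLoopAlt_eq n d 1 0 (by omega)

-- the worklist loop computes total plus the sum of solve over the stacked intervals
theorem solveLoop_eq (d : Int) (stack : List (Int × Int)) (total : Int) :
    solveLoop d stack total = total + (stack.map (fun p => solve p.1 p.2 d)).sum := by
  induction stack, total using solveLoop.induct d with
  | case1 total => simp [solveLoop]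
  | case2 total a b rest hab ih =>
      rw [solveLoop]
      simp only [fAlt_eq]
      simp only [List.map_cons, List.sum_cons]
      rw [solve]
      split_ifs
      rw [ih]; ring
  | case3 total a b rest hab glo ghi hg ih =>
      have hg' : fAlt a d - a - (b - a) > 0 ∨ fAlt b d - b + (b - a) < 0 := hg
      rw [fAlt_eq, fAlt_eq] at hg'
      rw [solveLoop]
      simp only [fAlt_eq]
      simp only [List.map_cons, List.sum_cons]
      rw [solve]
      simp only [List.sum_cons, dite_eq_ite]
      split_ifs <;> first | (rw [ih]; ring) | omega
  | case4 total b rest ghi hab glo hg ih =>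
      have hg' : ¬(fAlt b d - b - (b - b) > 0 ∨ fAlt b d - b + (b - b) < 0) := hg
      rw [fAlt_eq] at hg'
      have ih' : solveLoop d rest (total + if fAlt b d - b = 0 then b else 0) =
          (total + if fAlt b d - b = 0 then b else 0) +
            (List.map (fun p => solve p.1 p.2 d) rest).sum := ih
      rw [fAlt_eq] at ih'
      rw [solveLoop]
      simp only [fAlt_eq]
      simp only [List.map_cons, List.sum_cons]
      rw [solve]
      simp only [dite_eq_ite]
      simp only [ite_true]
      rw [ih']
      split_ifs <;> omega
  | case5 total a b rest hab glo ghi hg hne mid ih =>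
      have hg' : ¬(fAlt a d - a - (b - a) > 0 ∨ fAlt b d - b + (b - a) < 0) := hg
      rw [fAlt_eq, fAlt_eq] at hg'
      have ih' : solveLoop d
            ((a, a + PySem.Int.floordiv (b - a) 2) ::
              (a + PySem.Int.floordiv (b - a) 2 + 1, b) :: rest) total =
          total + (List.map (fun p => solve p.1 p.2 d)
            ((a, a + PySem.Int.floordiv (b - a) 2) ::
              (a + PySem.Int.floordiv (b - a) 2 + 1, b) :: rest)).sum := ih
      simp only [List.map_cons, List.sum_cons] at ih'
      rw [solveLoop]
      simp only [fAlt_eq]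
      simp only [List.map_cons, List.sum_cons]
      rw [solve]
      simp only [List.sum_cons]
      split_ifs
      rw [ih']; ring

-- ===== VERDICT (by name: the statement is the Claim_ definition above) =====
theorem solve_spec : Claim_equal_solve := by
  intro lo hi d _
  unfold Spec_solve solve_alt
  rw [solveLoop_eq]
  simp
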